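-- pv_equiv track=rewrite | github.com/SteveImmanuel/ChatBot-Tubes3STIMA | regex.py | deleteStopWord
-- ===== SOURCE A (Python) =====
-- def deleteStopWord(pattern, listOfStopWord):
-- #clean the received string
--
--     temp=pattern.split(' ')
--     for word in listOfStopWord:
--         try:
--             temp.remove(word)
--         except:
--             continue
--     temp=' '.join(temp)
--     return temp
-- ===== SOURCE B (Python) =====
-- def deleteStopWord(pattern, listOfStopWord):
--     # count stop-word multiplicities once, then one pass skipping up to that
--     # many leftmost occurrences of each word
--     cnt = {}
--     for w in listOfStopWord:
--         cnt[w] = cnt.get(w, 0) + 1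
--     out = []
--     for w in pattern.split(' '):
--         c = cnt.get(w, 0)
--         if c > 0:
--             cnt[w] = c - 1
--         else:
--             out.append(w)
--     return ' '.join(out)
-- ===== Notes on version B (the rewrite author's own statement) =====
-- stated objective: faster
-- what changed: Replaces the per-stop-word list.remove scan (O(W*S)) with a multiplicity counter built once and a single pass over the words that skips up to that many leftmost occurrences of each word.
import Mathlib
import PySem

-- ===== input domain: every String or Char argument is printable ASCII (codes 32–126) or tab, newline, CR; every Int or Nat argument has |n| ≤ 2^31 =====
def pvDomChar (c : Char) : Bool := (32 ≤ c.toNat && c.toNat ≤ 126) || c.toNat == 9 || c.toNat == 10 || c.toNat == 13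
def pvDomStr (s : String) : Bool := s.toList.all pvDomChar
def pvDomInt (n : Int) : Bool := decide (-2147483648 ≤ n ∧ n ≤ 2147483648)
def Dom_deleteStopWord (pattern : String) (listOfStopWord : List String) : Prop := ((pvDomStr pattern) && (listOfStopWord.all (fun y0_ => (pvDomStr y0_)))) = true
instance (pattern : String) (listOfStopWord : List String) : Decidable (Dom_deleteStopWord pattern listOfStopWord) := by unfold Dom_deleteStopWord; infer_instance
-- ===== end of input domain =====

-- B replaces A's per-stop-word list.remove scan with a multiplicity counter and one pass over the words (same return value).

-- ===== PORT A =====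
def deleteStopWord (pattern : String) (listOfStopWord : List String) : String :=
  let temp := (PySem.Str.split? pattern " ").getD []   -- sep " " ≠ "" so split? is always some
  -- for word in listOfStopWord: try temp.remove(word) except: continue
  let temp := listOfStopWord.foldl (fun t word => (PySem.List.remove? t word).getD t) temp
  PySem.Str.join " " temp

-- ===== PORT B =====
def deleteStopWord_alt (pattern : String) (listOfStopWord : List String) : String :=
  -- cnt[w] = cnt.get(w, 0) + 1
  let cnt : PySem.Dict String Int :=
    listOfStopWord.foldl (fun d w => d.insert w (d.getD w 0 + 1)) PySem.Dict.empty
  -- single pass: skip a word while its budget remains, else append it to out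
  let st := ((PySem.Str.split? pattern " ").getD []).foldl
    (fun (st : PySem.Dict String Int × List String) w =>
      if st.1.getD w 0 > 0 then (st.1.insert w (st.1.getD w 0 - 1), st.2)
      else (st.1, st.2 ++ [w]))
    (cnt, [])
  PySem.Str.join " " st.2

-- ===== PRECONDITION & SPEC =====
def Spec_deleteStopWord (pattern : String) (listOfStopWord : List String) (out : String) : Prop := out = deleteStopWord_alt pattern listOfStopWord
instance (pattern : String) (listOfStopWord : List String) (out : String) : Decidable (Spec_deleteStopWord pattern listOfStopWord out) := by unfold Spec_deleteStopWord; infer_instance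

-- ===== CLAIM (what is proved, stated in full; the proofs are below) =====
def Claim_equal_deleteStopWord : Prop := ∀ (pattern : String) (listOfStopWord : List String), Dom_deleteStopWord pattern listOfStopWord → Spec_deleteStopWord pattern listOfStopWord (deleteStopWord pattern listOfStopWord)

-- ===== LEMMAS AND PROOFS =====

set_option maxRecDepth 4000

-- the common value: keep exactly the words whose budget is exhausted
def pvKeep : List String → (String → Int) → List String
  | [], _ => []
  | w :: ws, c =>
    if c w > 0 then pvKeep ws (fun x => if x = w then c w - 1 else c x)
    else w :: pvKeep ws c

theorem pvKeep_zero : ∀ ws : List String, pvKeep ws (fun _ => (0 : Int)) = ws := by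
  intro ws
  induction ws with
  | nil => rfl
  | cons w ws ih => simp only [pvKeep]; norm_num [ih]

-- removing the first occurrence of s equals bumping s's budget by one (budgets nonneg)
theorem pvKeep_remove (s : String) : ∀ (ws : List String) (c : String → Int), (∀ x, 0 ≤ c x) →
    pvKeep ((PySem.List.remove? ws s).getD ws) c
      = pvKeep ws (fun x => if x = s then c x + 1 else c x) := by
  intro ws
  induction ws with
  | nil =>
    intro c _
    have h0 : PySem.List.remove? ([] : List String) s = none := by
      rw [PySem.List.remove?_eq_none_iff]; simp
    simp [h0, pvKeep]
  | cons w ws ih =>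
    intro c hc
    by_cases hws : w = s
    · subst hws
      rw [PySem.List.remove?_cons_self, Option.getD_some]
      simp only [pvKeep, if_true]
      have hw : (0 : Int) < c w + 1 := by have := hc w; omega
      rw [if_pos hw]
      congr 1
      funext x
      rcases eq_or_ne x w with hx | hx
      · subst hx; simp
      · simp [hx]
    · have hne : w ≠ s := hws
      cases hrem : PySem.List.remove? ws s with
      | none =>
        have h0 : PySem.List.remove? (w :: ws) s = none := by
          rw [PySem.List.remove?_eq_none_iff] at hrem ⊢
          simp only [List.mem_cons, not_or]
          exact ⟨Ne.symm hne, hrem⟩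
        rw [h0, Option.getD_none]
        simp only [pvKeep, if_neg hne]
        by_cases hcw : c w > 0
        · rw [if_pos hcw, if_pos hcw]
          have ihd := ih (fun x => if x = w then c w - 1 else c x)
            (by intro x; rcases eq_or_ne x w with hx | hx <;> simp [hx] <;> [omega; exact hc x])
          rw [hrem, Option.getD_none] at ihd
          rw [ihd]
          congr 1
          funext x
          rcases eq_or_ne x w with hx | hx
          · subst hx; simp [hne]
          · rcases eq_or_ne x s with hxs | hxs
            · subst hxs; simp [hx]
            · simp [hx, hxs]
        · rw [if_neg hcw, if_neg hcw]
          have ihn := ih c hc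
          rw [hrem, Option.getD_none] at ihn
          exact congrArg (w :: ·) ihn
      | some t =>
        have h1 : PySem.List.remove? (w :: ws) s = some (w :: t) := by
          rw [PySem.List.remove?_cons_of_ne ws hne, hrem]; rfl
        rw [h1, Option.getD_some]
        simp only [pvKeep, if_neg hne]
        by_cases hcw : c w > 0
        · rw [if_pos hcw, if_pos hcw]
          have ihd := ih (fun x => if x = w then c w - 1 else c x)
            (by intro x; rcases eq_or_ne x w with hx | hx <;> simp [hx] <;> [omega; exact hc x])
          rw [hrem, Option.getD_some] at ihd
          rw [ihd]
          congr 1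
          funext x
          rcases eq_or_ne x w with hx | hx
          · subst hx; simp [hne]
          · rcases eq_or_ne x s with hxs | hxs
            · subst hxs; simp [hx]
            · simp [hx, hxs]
        · rw [if_neg hcw, if_neg hcw]
          have ihn := ih c hc
          rw [hrem, Option.getD_some] at ihn
          exact congrArg (w :: ·) ihn

-- A's fold over the stop-word list computes pvKeep with the multiplicity counts
theorem pvA_eq_keep : ∀ (stops ws : List String),
    stops.foldl (fun t word => (PySem.List.remove? t word).getD t) ws
      = pvKeep ws (fun x => (stops.count x : Int)) := by
  intro stops
  induction stops with
  | nil =>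
    intro ws
    simp only [List.foldl_nil, List.count_nil, Int.natCast_zero]
    exact (pvKeep_zero ws).symm
  | cons s rest ih =>
    intro ws
    simp only [List.foldl_cons]
    rw [ih, pvKeep_remove s _ _ (by intro x; positivity)]
    congr 1
    funext x
    rcases eq_or_ne x s with hx | hx
    · subst hx
      simp only [if_true, List.count_cons]
      push_cast
      simp
    · simp only [if_neg hx, List.count_cons, beq_iff_eq]
      push_cast
      simp [Ne.symm hx]

-- B's single pass computes pvKeep from any dict state, appending to the accumulator
theorem pvB_eq_keep : ∀ (ws : List String) (d : PySem.Dict String Int) (acc : List String),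
    (ws.foldl
      (fun (st : PySem.Dict String Int × List String) w =>
        if st.1.getD w 0 > 0 then (st.1.insert w (st.1.getD w 0 - 1), st.2)
        else (st.1, st.2 ++ [w]))
      (d, acc)).2 = acc ++ pvKeep ws (fun x => d.getD x 0) := by
  intro ws
  induction ws with
  | nil => intro d acc; simp [pvKeep]
  | cons w ws ih =>
    intro d acc
    simp only [List.foldl_cons]
    by_cases hc : d.getD w 0 > 0
    · rw [if_pos hc, ih]
      simp only [pvKeep, if_pos hc]
      congr 2
      funext x
      rw [PySem.Dict.getD_insert]
    · rw [if_neg hc, ih]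
      simp [pvKeep, if_neg hc]

-- ===== VERDICT (by name: the statement is the Claim_ definition above) =====
theorem deleteStopWord_spec : Claim_equal_deleteStopWord := by
  intro pattern stops _
  show deleteStopWord pattern stops = deleteStopWord_alt pattern stops
  simp only [deleteStopWord, deleteStopWord_alt]
  rw [pvA_eq_keep, pvB_eq_keep, List.nil_append]
  congr 1
  congr 1
  funext x
  rw [PySem.Dict.foldl_insert_getD_add_one_eq_counter, PySem.Dict.getD_counter]
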